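-- pv_equiv track=rewrite | github.com/Brasme/batteries_4_of_8 | sequences.py | generate_covering_sequence
-- ===== SOURCE A (Python) =====
-- import itertools
--
-- def generate_covering_sequence(groups):
--     """Generate a pair sequence that covers the given groups.
--
--     Strategy: Create pairs that span/connect groups sensibly.
--     Try to pair indices across groups to maximize coverage.
--     Always start with (0, 1) if 0 and 1 are in different groups.
--     """
--     all_indices = [idx for group in groups for idx in group]
--     all_pairs = list(itertools.combinations(all_indices, 2))
--
--     # Ensure (0, 1) is first if it exists
--     sequence = []
--     if (0, 1) in all_pairs:
--         sequence = [(0, 1)]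
--         remaining_pairs = [p for p in all_pairs if p != (0, 1)]
--     else:
--         remaining_pairs = all_pairs
--
--     # Sort remaining pairs: prioritize those crossing groups
--     def crossing_count(pair):
--         a, b = pair
--         group_a = next((i for i, g in enumerate(groups) if a in g), -1)
--         group_b = next((i for i, g in enumerate(groups) if b in g), -1)
--         return 0 if group_a == group_b else 1  # Crossing pairs first
--
--     remaining_pairs.sort(key=crossing_count, reverse=True)
--     sequence.extend(remaining_pairs)
--
--     return sequence
-- ===== SOURCE B (Python) =====
-- import itertools
--
-- def generate_covering_sequence(groups):
--     """Single-pass two-bucket partition instead of A's per-pair group scans + stable sort."""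
--     idx2group = {}
--     for gi, group in enumerate(groups):
--         for idx in group:
--             if idx not in idx2group:
--                 idx2group[idx] = gi
--     all_indices = [idx for group in groups for idx in group]
--     has_01 = False
--     crossing = []
--     intra = []
--     for a, b in itertools.combinations(all_indices, 2):
--         if (a, b) == (0, 1):
--             has_01 = True
--         elif idx2group.get(a, -1) != idx2group.get(b, -1):
--             crossing.append((a, b))
--         else:
--             intra.append((a, b))
--     return ([(0, 1)] if has_01 else []) + crossing + intra
-- ===== Notes on version B (the rewrite author's own statement) =====
-- stated objective: faster
-- what changed: B precomputes an index->first-group dictionary once and routes each pair in a single linear pass into a crossing bucket and an intra bucket (concatenated after the optional (0,1) head), replacing A's per-pair next()-scan over all groups and its stable sort of the pair list by key.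
import Mathlib
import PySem

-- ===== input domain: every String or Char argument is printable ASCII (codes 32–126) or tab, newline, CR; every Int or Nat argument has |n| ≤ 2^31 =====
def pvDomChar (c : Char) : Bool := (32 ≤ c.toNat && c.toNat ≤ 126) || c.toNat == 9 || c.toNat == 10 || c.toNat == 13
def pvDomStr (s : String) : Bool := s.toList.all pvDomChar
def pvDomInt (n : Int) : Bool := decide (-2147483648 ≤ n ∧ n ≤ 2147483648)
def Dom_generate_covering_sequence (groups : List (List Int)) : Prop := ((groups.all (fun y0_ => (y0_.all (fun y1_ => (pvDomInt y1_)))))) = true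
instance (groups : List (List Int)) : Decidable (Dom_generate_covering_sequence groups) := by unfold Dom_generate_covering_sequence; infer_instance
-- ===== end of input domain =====

-- B replaces A's per-pair group scans and stable sort by a precomputed index->first-group
-- dictionary and a single-pass two-bucket (crossing/intra) partition; measured faster.

-- ===== PORT A =====
-- itertools.combinations(xs, 2), pairs rendered as 2-element lists (tuple -> list per convention)
def pvComb2 : List Int → List (List Int)
  | [] => []
  | x :: rest => rest.map (fun y => [x, y]) ++ pvComb2 rest

-- next((i for i, g in enumerate(groups) if a in g), -1)
def pvFirstGroup (groups : List (List Int)) (a : Int) : Int :=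
  match (PySem.List.enumerate groups).find? (fun ig => decide (a ∈ ig.2)) with
  | some ig => ig.1
  | none => -1

-- def crossing_count(pair): a, b = pair; …  (pairs from combinations always unpack; default branch unreachable)
def pvCrossingCount (groups : List (List Int)) (p : List Int) : Int :=
  match p with
  | [a, b] => if pvFirstGroup groups a = pvFirstGroup groups b then 0 else 1
  | _ => 0

def generate_covering_sequence (groups : List (List Int)) : List (List Int) :=
  let all_indices := groups.flatMap (fun g => g)
  let all_pairs := pvComb2 all_indices
  let sequence := if all_pairs.contains [0, 1] then [([0, 1] : List Int)] else []
  let remaining := if all_pairs.contains [0, 1] then all_pairs.filter (fun p => p != [0, 1]) else all_pairs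
  sequence ++ PySem.List.sorted remaining (pvCrossingCount groups) true

-- ===== PORT B =====
-- idx2group: first containing group wins (insert only if absent)
def pvBuildIdx2Group (groups : List (List Int)) : PySem.Dict Int Int :=
  (PySem.List.enumerate groups).foldl
    (fun d gig =>
      gig.2.foldl (fun d idx => if PySem.Dict.contains d idx then d else PySem.Dict.insert d idx gig.1) d)
    PySem.Dict.empty

-- loop body: route one pair into the flag / crossing bucket / intra bucket
def pvRoute (d : PySem.Dict Int Int) (st : Bool × List (List Int) × List (List Int))
    (p : List Int) : Bool × List (List Int) × List (List Int) :=
  match p with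
  | [a, b] =>
    if a = 0 ∧ b = 1 then (true, st.2.1, st.2.2)
    else if PySem.Dict.getD d a (-1) ≠ PySem.Dict.getD d b (-1) then (st.1, st.2.1 ++ [p], st.2.2)
    else (st.1, st.2.1, st.2.2 ++ [p])
  | _ => st

def generate_covering_sequence_alt (groups : List (List Int)) : List (List Int) :=
  let d := pvBuildIdx2Group groups
  let all_indices := groups.flatMap (fun g => g)
  let st := (pvComb2 all_indices).foldl (pvRoute d) (false, [], [])
  (if st.1 then [([0, 1] : List Int)] else []) ++ st.2.1 ++ st.2.2

-- ===== PRECONDITION & SPEC =====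
def Spec_generate_covering_sequence (groups : List (List Int)) (out : List (List Int)) : Prop := out = generate_covering_sequence_alt groups
instance (groups : List (List Int)) (out : List (List Int)) : Decidable (Spec_generate_covering_sequence groups out) := by unfold Spec_generate_covering_sequence; infer_instance

-- ===== CLAIM (what is proved, stated in full; the proofs are below) =====
def Claim_equal_generate_covering_sequence : Prop := ∀ (groups : List (List Int)), Dom_generate_covering_sequence groups → Spec_generate_covering_sequence groups (generate_covering_sequence groups)

-- ===== LEMMAS AND PROOFS =====

-- recursive form of A's first-containing-group search, with running start index
def pvFG : List (List Int) → Int → Int → Int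
  | [], _, _ => -1
  | g :: gs, s, a => if a ∈ g then s else pvFG gs (s + 1) a

lemma pvFirstGroup_eq_fg_aux (gs : List (List Int)) : ∀ (s a : Int),
    (match (PySem.List.enumerate gs s).find? (fun ig => decide (a ∈ ig.2)) with
      | some ig => ig.1
      | none => (-1 : Int)) = pvFG gs s a := by
  induction gs with
  | nil => intro s a; simp [PySem.List.enumerate_nil, pvFG]
  | cons g gs ih =>
    intro s a
    rw [PySem.List.enumerate_cons]
    by_cases h : a ∈ g
    · simp [h, pvFG]
    · simp [h, pvFG, ih]

lemma pvFirstGroup_eq_fg (groups : List (List Int)) (a : Int) :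
    pvFirstGroup groups a = pvFG groups 0 a := by
  unfold pvFirstGroup
  exact pvFirstGroup_eq_fg_aux groups 0 a

lemma pvInnerFold (g : List Int) : ∀ (d : PySem.Dict Int Int) (gi a : Int),
    (g.foldl (fun d idx => if PySem.Dict.contains d idx then d else PySem.Dict.insert d idx gi) d).getD a (-1)
      = (if PySem.Dict.contains d a then d.getD a (-1) else if a ∈ g then gi else -1)
    ∧ (g.foldl (fun d idx => if PySem.Dict.contains d idx then d else PySem.Dict.insert d idx gi) d).contains a
      = (d.contains a || decide (a ∈ g)) := by
  induction g with
  | nil =>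
    intro d gi a
    refine ⟨?_, by simp⟩
    by_cases h : PySem.Dict.contains d a
    · simp [h]
    · simp [h, PySem.Dict.getD_of_not_contains]
  | cons x g ih =>
    intro d gi a
    simp only [List.foldl_cons]
    by_cases hx : PySem.Dict.contains d x
    · rw [if_pos hx]
      rcases ih d gi a with ⟨h1, h2⟩
      refine ⟨?_, ?_⟩
      · rw [h1]
        by_cases hda : PySem.Dict.contains d a
        · simp [hda]
        · have hax : a ≠ x := fun he => hda (he ▸ hx)
          simp [hda, hax]
      · rw [h2]
        by_cases hax : a = x
        · subst hax; simp [hx]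
        · simp [List.mem_cons, hax]
    · rw [if_neg hx]
      rcases ih (PySem.Dict.insert d x gi) gi a with ⟨h1, h2⟩
      refine ⟨?_, ?_⟩
      · rw [h1, PySem.Dict.contains_insert, PySem.Dict.getD_insert]
        by_cases hax : a = x
        · subst hax; simp [hx]
        · have hbx : (a == x) = false := by simp [hax]
          rw [hbx]
          simp [hax]
      · rw [h2, PySem.Dict.contains_insert]
        by_cases hax : a = x
        · subst hax; simp
        · have hbx : (a == x) = false := by simp [hax]
          rw [hbx]
          simp [List.mem_cons, hax]

lemma pvOuterFold (gs : List (List Int)) : ∀ (s : Int) (d : PySem.Dict Int Int) (a : Int),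
    ((PySem.List.enumerate gs s).foldl
        (fun d gig =>
          gig.2.foldl (fun d idx => if PySem.Dict.contains d idx then d else PySem.Dict.insert d idx gig.1) d)
        d).getD a (-1)
      = (if PySem.Dict.contains d a then d.getD a (-1) else pvFG gs s a) := by
  induction gs with
  | nil =>
    intro s d a
    rw [PySem.List.enumerate_nil]
    simp only [List.foldl_nil, pvFG]
    by_cases h : PySem.Dict.contains d a
    · simp [h]
    · simp [h, PySem.Dict.getD_of_not_contains]
  | cons g gs ih =>
    intro s d a
    rw [PySem.List.enumerate_cons]
    simp only [List.foldl_cons]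
    rw [ih]
    rcases pvInnerFold g d s a with ⟨h1, h2⟩
    rw [h1, h2]
    by_cases hda : PySem.Dict.contains d a
    · simp [hda]
    · by_cases hag : a ∈ g
      · simp [hda, hag, pvFG]
      · simp [hda, hag, pvFG]

lemma pvDict_eq_firstGroup (groups : List (List Int)) (a : Int) :
    (pvBuildIdx2Group groups).getD a (-1) = pvFirstGroup groups a := by
  unfold pvBuildIdx2Group
  rw [pvOuterFold, pvFirstGroup_eq_fg]
  simp

-- B-side crossing predicate, as a function of the dict
def pvCrossB (d : PySem.Dict Int Int) (p : List Int) : Bool :=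
  match p with
  | [a, b] => decide (PySem.Dict.getD d a (-1) ≠ PySem.Dict.getD d b (-1))
  | _ => false

lemma pvKey01 (groups : List (List Int)) (p : List Int) :
    pvCrossingCount groups p = 0 ∨ pvCrossingCount groups p = 1 := by
  rcases p with _ | ⟨a, p⟩
  · simp [pvCrossingCount]
  rcases p with _ | ⟨b, p⟩
  · simp [pvCrossingCount]
  rcases p with _ | ⟨c, p⟩
  · simp only [pvCrossingCount]; split <;> simp
  · simp [pvCrossingCount]

lemma pvInsertBy_ones (key : List Int → Int) (x : List Int) (hx : key x = 1) :
    ∀ (F Z : List (List Int)), (∀ y ∈ F, key y = 1) → (∀ z ∈ Z, key z = 0) →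
    PySem.List.insertBy (fun a b => decide (key b < key a)) x (F ++ Z) = F ++ x :: Z := by
  intro F
  induction F with
  | nil =>
    intro Z _ hZ
    cases Z with
    | nil => simp [PySem.List.insertBy]
    | cons z Z' =>
      have : key z = 0 := hZ z (by simp)
      simp [PySem.List.insertBy, this, hx]
  | cons y F' ih =>
    intro Z hF hZ
    have hy : key y = 1 := hF y (by simp)
    simp only [List.cons_append, PySem.List.insertBy, hy, hx]
    rw [if_neg (by simp), ih Z (fun y hy => hF y (by simp [hy])) hZ]

lemma pvSortAux (key : List Int → Int) (hkey : ∀ x, key x = 0 ∨ key x = 1) :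
    ∀ (xs F Z : List (List Int)), (∀ y ∈ F, key y = 1) → (∀ z ∈ Z, key z = 0) →
    xs.foldl (fun acc x => PySem.List.insertBy (fun a b => decide (key b < key a)) x acc) (F ++ Z)
      = (F ++ xs.filter (fun x => key x == 1)) ++ (Z ++ xs.filter (fun x => key x == 0)) := by
  intro xs
  induction xs with
  | nil => intro F Z _ _; simp
  | cons x xs ih =>
    intro F Z hF hZ
    simp only [List.foldl_cons]
    rcases hkey x with h0 | h1
    · -- key x = 0 : append at the very end
      have hall : ∀ y ∈ F ++ Z, (fun a b => decide (key b < key a)) x y = false := by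
        intro y hy
        rcases hkey y with h | h <;> simp [h, h0]
      rw [PySem.List.insertBy_of_forall_not_before _ _ _ hall, List.append_assoc]
      rw [ih F (Z ++ [x]) hF (by intro z hz; rcases List.mem_append.mp hz with h | h
                                 · exact hZ z h
                                 · simp at h; subst h; exact h0)]
      simp [h0, List.append_assoc]
    · -- key x = 1 : insert between the buckets
      rw [pvInsertBy_ones key x h1 F Z hF hZ]
      have : F ++ x :: Z = (F ++ [x]) ++ Z := by simp
      rw [this, ih (F ++ [x]) Z (by intro y hy; rcases List.mem_append.mp hy with h | h
                                    · exact hF y h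
                                    · simp at h; subst h; exact h1) hZ]
      simp [h1, List.append_assoc]

lemma pvSorted01 (xs : List (List Int)) (key : List Int → Int) (hkey : ∀ x, key x = 0 ∨ key x = 1) :
    PySem.List.sorted xs key true
      = xs.filter (fun x => key x == 1) ++ xs.filter (fun x => key x == 0) := by
  rw [PySem.List.sorted_rev_eq_foldl_insertBy]
  have := pvSortAux key hkey xs [] [] (by simp) (by simp)
  simpa using this

lemma pvComb2_shape (xs : List Int) : ∀ p ∈ pvComb2 xs, ∃ a b : Int, p = [a, b] := by
  induction xs with
  | nil => simp [pvComb2]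
  | cons x xs ih =>
    intro p hp
    rcases List.mem_append.mp hp with h | h
    · rcases List.mem_map.mp h with ⟨y, _, rfl⟩; exact ⟨x, y, rfl⟩
    · exact ih p h

lemma pvRouteFold (d : PySem.Dict Int Int) :
    ∀ (L : List (List Int)) (b : Bool) (C I : List (List Int)),
    (∀ p ∈ L, ∃ a b : Int, p = [a, b]) →
    L.foldl (pvRoute d) (b, C, I)
      = (b || L.any (fun p => p == [0, 1]),
         C ++ (L.filter (fun p => p != [0, 1])).filter (fun p => pvCrossB d p),
         I ++ (L.filter (fun p => p != [0, 1])).filter (fun p => !(pvCrossB d p))) := by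
  intro L
  induction L with
  | nil => intro b C I _; simp
  | cons p L ih =>
    intro b C I hshape
    rcases hshape p (by simp) with ⟨x, y, rfl⟩
    simp only [List.foldl_cons]
    by_cases h01 : x = 0 ∧ y = 1
    · rcases h01 with ⟨rfl, rfl⟩
      rw [show pvRoute d (b, C, I) [0, 1] = (true, C, I) by simp [pvRoute]]
      rw [ih true C I (fun q hq => hshape q (by simp [hq]))]
      simp
    · have hne : ([x, y] : List Int) ≠ [0, 1] := by
        intro h; injection h with h1 h2; injection h2 with h2 _; exact h01 ⟨h1, h2⟩
      have hb01 : (x == 0 && y == 1) = false := by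
        by_cases hx0 : x = (0 : Int)
        · by_cases hy1 : y = (1 : Int)
          · exact absurd ⟨hx0, hy1⟩ h01
          · simp [hy1]
        · simp [hx0]
      by_cases hc : PySem.Dict.getD d x (-1) ≠ PySem.Dict.getD d y (-1)
      · rw [show pvRoute d (b, C, I) [x, y] = (b, C ++ [[x, y]], I) by simp [pvRoute, h01, hc]]
        rw [ih b (C ++ [[x, y]]) I (fun q hq => hshape q (by simp [hq]))]
        have hcb : pvCrossB d [x, y] = true := by simp [pvCrossB, hc]
        simp [List.any_cons, hne, hcb, hb01, List.append_assoc]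
      · rw [show pvRoute d (b, C, I) [x, y] = (b, C, I ++ [[x, y]]) by simp [pvRoute, h01, hc]]
        rw [ih b C (I ++ [[x, y]]) (fun q hq => hshape q (by simp [hq]))]
        have hcb : pvCrossB d [x, y] = false := by simp [pvCrossB]; tauto
        simp [List.any_cons, hne, hcb, hb01, List.append_assoc]

lemma pvKey_eq_cross (groups : List (List Int)) (p : List Int)
    (hshape : ∃ a b : Int, p = [a, b]) :
    (pvCrossingCount groups p == 1) = pvCrossB (pvBuildIdx2Group groups) p := by
  rcases hshape with ⟨a, b, rfl⟩
  simp only [pvCrossingCount, pvCrossB, pvDict_eq_firstGroup]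
  by_cases h : pvFirstGroup groups a = pvFirstGroup groups b <;> simp [h]

-- ===== VERDICT (by name: the statement is the Claim_ definition above) =====
theorem generate_covering_sequence_spec : Claim_equal_generate_covering_sequence := by
  intro groups _
  unfold Spec_generate_covering_sequence generate_covering_sequence generate_covering_sequence_alt
  simp only []
  set d := pvBuildIdx2Group groups with hd
  set L := pvComb2 (groups.flatMap (fun g => g)) with hL
  have hshape : ∀ p ∈ L, ∃ a b : Int, p = [a, b] := pvComb2_shape _
  rw [pvRouteFold d L false [] [] hshape]
  simp only [Bool.false_or, List.nil_append]
  -- the (0,1) flag: contains = any (· == [0,1])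
  have hflag : L.contains ([0, 1] : List Int) = L.any (fun p => p == [0, 1]) := by
    induction L with
    | nil => rfl
    | cons p L ih =>
      simp only [List.contains_cons, List.any_cons, ← ih]
      rw [BEq.comm]
  -- the remaining list of A in both branches equals the ≠[0,1] filter of L
  have hrem : (if L.contains ([0, 1] : List Int) then L.filter (fun p => p != [0, 1]) else L)
      = L.filter (fun p => p != [0, 1]) := by
    by_cases h : L.contains ([0, 1] : List Int)
    · rw [if_pos h]
    · rw [if_neg h]
      have hall : ∀ p ∈ L, (p != ([0, 1] : List Int)) = true := by
        intro p hp
        have hne : p ≠ [0, 1] := by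
          intro he; subst he; exact h (by simpa using hp)
        simp [hne]
      exact (List.filter_eq_self.mpr hall).symm
  rw [hrem]
  -- the sort is the two-bucket partition
  rw [pvSorted01 _ _ (pvKey01 groups), hflag]
  have h1eq : (L.filter (fun p => p != [0, 1])).filter (fun x => pvCrossingCount groups x == 1)
      = (L.filter (fun p => p != [0, 1])).filter (fun p => pvCrossB d p) := by
    apply List.filter_congr
    intro p hp
    exact pvKey_eq_cross groups p (hshape p (List.mem_of_mem_filter hp))
  have h0eq : (L.filter (fun p => p != [0, 1])).filter (fun x => pvCrossingCount groups x == 0)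
      = (L.filter (fun p => p != [0, 1])).filter (fun p => !(pvCrossB d p)) := by
    apply List.filter_congr
    intro p hp
    have h := pvKey_eq_cross groups p (hshape p (List.mem_of_mem_filter hp))
    rw [hd]
    rcases pvKey01 groups p with hk | hk <;> simp [hk] at h ⊢ <;> simp [h]
  rw [h1eq, h0eq, ← List.append_assoc]
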